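-- pv_equiv track=rewrite | github.com/dsipakou/codewars | men_boy.py | man
-- ===== SOURCE A (Python) =====
-- def man(arr):
--     men = set()
--     boys = set()
--     for item in arr:
--         if item % 2 == 0:
--             men.add(item)
--         else:
--             boys.add(item)
--     men = sorted(men)
--     boys = sorted(boys, reverse=True)
--     return men + boys
-- ===== SOURCE B (Python) =====
-- def man(arr):
--     # One sort with a composite key: evens (x % 2 == 0) come first, ordered by x
--     # ascending; odds come after, ordered by -x, i.e. descending. No partition,
--     # no concatenation, no reverse.
--     return sorted(set(arr), key=lambda x: (x % 2, x if x % 2 == 0 else -x))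
-- ===== Notes on version B (the rewrite author's own statement) =====
-- stated objective: simpler
-- what changed: B replaces A's partition-into-two-sets, two separate sorts and concatenation by a single sort of the deduplicated input under one composite key (x % 2, x if even else -x), which directly yields evens ascending followed by odds descending.
import Mathlib
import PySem

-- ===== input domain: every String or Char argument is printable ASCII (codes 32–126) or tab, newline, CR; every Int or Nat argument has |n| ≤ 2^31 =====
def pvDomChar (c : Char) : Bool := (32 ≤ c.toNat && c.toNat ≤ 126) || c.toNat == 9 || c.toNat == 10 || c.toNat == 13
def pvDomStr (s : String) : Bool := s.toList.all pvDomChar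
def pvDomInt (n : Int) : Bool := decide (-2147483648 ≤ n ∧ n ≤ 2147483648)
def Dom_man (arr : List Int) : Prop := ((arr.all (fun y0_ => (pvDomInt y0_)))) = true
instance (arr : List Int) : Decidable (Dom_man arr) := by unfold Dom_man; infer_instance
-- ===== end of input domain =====

-- B replaces A's partition-into-two-sets + two sorts + concatenation by a single sort of the
-- deduplicated input under one composite key (x % 2, x if even else -x); same result, proved equal.

-- ===== PORT A =====
def man (arr : List Int) : List Int :=
  -- men = set(); boys = set(); for item in arr: if item % 2 == 0: men.add(item) else: boys.add(item)
  let mb : PySem.Set Int × PySem.Set Int :=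
    arr.foldl (fun mb item =>
      if PySem.Int.mod item 2 == 0 then (mb.1.add item, mb.2) else (mb.1, mb.2.add item))
      (PySem.Set.empty, PySem.Set.empty)
  PySem.List.sorted mb.1 (fun x => x) false ++ PySem.List.sorted mb.2 (fun x => x) true

-- ===== PORT B =====
def man_alt (arr : List Int) : List Int :=
  -- sorted(set(arr), key=lambda x: (x % 2, x if x % 2 == 0 else -x))
  PySem.List.sorted2 (PySem.Set.ofList arr)
    (fun x => PySem.Int.mod x 2)
    (fun x => if PySem.Int.mod x 2 == 0 then x else -x) false

-- ===== PRECONDITION & SPEC =====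
def Spec_man (arr : List Int) (out : List Int) : Prop := out = man_alt arr
instance (arr : List Int) (out : List Int) : Decidable (Spec_man arr out) := by unfold Spec_man; infer_instance

-- ===== CLAIM (what is proved, stated in full; the proofs are below) =====
def Claim_equal_man : Prop := ∀ (arr : List Int), Dom_man arr → Spec_man arr (man arr)

-- ===== LEMMAS AND PROOFS =====

-- A's loop partitions the input into the even-set and the odd-set (as first-occurrence dedups).
theorem man_fold_split (arr : List Int) (m b : PySem.Set Int) :
    arr.foldl (fun mb item =>
      if PySem.Int.mod item 2 == 0 then (mb.1.add item, mb.2) else (mb.1, mb.2.add item))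
      (m, b)
    = (PySem.Set.update m (arr.filter (fun x => PySem.Int.mod x 2 == 0)),
       PySem.Set.update b (arr.filter (fun x => !(PySem.Int.mod x 2 == 0)))) := by
  induction arr generalizing m b with
  | nil => simp [PySem.Set.update]
  | cons x xs ih =>
    rw [List.foldl_cons]
    by_cases h : (PySem.Int.mod x 2 == 0) = true
    · rw [if_pos h, ih]
      simp only [List.filter_cons, h, Bool.not_true, PySem.Set.update,
        List.foldl_cons, Bool.false_eq_true, ite_false, ite_true]
    · rw [if_neg h, ih]
      simp only [List.filter_cons, h, PySem.Set.update, List.foldl_cons,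
        Bool.not_false, Bool.false_eq_true, ite_false, ite_true]

-- first-occurrence dedup commutes with filter, up to permutation
theorem ofList_filter_perm (xs : List Int) (p : Int → Bool) :
    (PySem.Set.ofList (xs.filter p)).Perm ((PySem.Set.ofList xs).filter p) := by
  apply List.perm_of_nodup_nodup_toFinset_eq
  · exact PySem.Set.nodup_ofList _
  · exact (PySem.Set.nodup_ofList xs).filter _
  · ext a
    simp only [List.mem_toFinset, PySem.Set.mem_ofList, List.mem_filter]

-- the combined numeric key used only in the proof: even x ↦ x, odd x ↦ 2^33 - x
def pvKey (x : Int) : Int := if PySem.Int.mod x 2 == 0 then x else 8589934592 - x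

-- inserting with two comparators that agree on a superset S gives the same list
theorem insertBy_congr (b1 b2 : Int → Int → Bool) (x : Int) (acc : List Int)
    (h : ∀ y ∈ acc, b1 x y = b2 x y) :
    PySem.List.insertBy b1 x acc = PySem.List.insertBy b2 x acc := by
  induction acc with
  | nil => rfl
  | cons y ys ih =>
    simp only [PySem.List.insertBy, h y (List.mem_cons_self)]
    split_ifs with hb
    · rfl
    · simp only [List.cons.injEq, true_and]
      exact ih (fun z hz => h z (List.mem_cons_of_mem _ hz))

theorem foldl_insertBy_congr (S : List Int) (b1 b2 : Int → Int → Bool)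
    (hb : ∀ a ∈ S, ∀ b ∈ S, b1 a b = b2 a b) :
    ∀ (l acc : List Int), (∀ x ∈ l, x ∈ S) → (∀ y ∈ acc, y ∈ S) →
      l.foldl (fun acc x => PySem.List.insertBy b1 x acc) acc
      = l.foldl (fun acc x => PySem.List.insertBy b2 x acc) acc := by
  intro l
  induction l with
  | nil => intro acc _ _; rfl
  | cons x xs ih =>
    intro acc hl hacc
    have hxS : x ∈ S := hl x (List.mem_cons_self)
    simp only [List.foldl_cons]
    rw [insertBy_congr b1 b2 x acc (fun y hy => hb x hxS y (hacc y hy))]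
    exact ih _ (fun z hz => hl z (List.mem_cons_of_mem _ hz))
      (fun y hy => by
        rcases (PySem.List.mem_insertBy b2 x y acc).mp hy with h | h
        · exact h ▸ hxS
        · exact hacc y h)

-- on Dom-bounded integers, the lexicographic comparator of B's tuple key equals the
-- comparator of the single numeric key pvKey
theorem comparator_agree (a b : Int)
    (ha : -2147483648 ≤ a ∧ a ≤ 2147483648) (hb : -2147483648 ≤ b ∧ b ≤ 2147483648) :
    (decide (PySem.Int.mod a 2 < PySem.Int.mod b 2)
      || (!decide (PySem.Int.mod b 2 < PySem.Int.mod a 2)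
          && decide ((if PySem.Int.mod a 2 == 0 then a else -a)
              < (if PySem.Int.mod b 2 == 0 then b else -b))))
    = decide (pvKey a < pvKey b) := by
  unfold pvKey
  rcases PySem.Int.mod_two_eq a with h1 | h1 <;> rcases PySem.Int.mod_two_eq b with h2 | h2 <;>
    · simp only [h1, h2, show ((0:Int) == 0) = true from rfl, show ((1:Int) == 0) = false from rfl,
        Bool.false_eq_true, if_true, if_false, ← decide_not, ← Bool.decide_and, ← Bool.decide_or]
      rcases ha with ⟨ha1, ha2⟩; rcases hb with ⟨hb1, hb2⟩
      exact decide_eq_decide.mpr (by constructor <;> intro h <;> omega)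

-- B's sorted2 under the tuple key equals sorted under pvKey, for Dom-bounded inputs
theorem man_alt_eq_sorted_pvKey (arr : List Int) (hdom : Dom_man arr) :
    man_alt arr = PySem.List.sorted (PySem.Set.ofList arr) pvKey false := by
  have hbnd : ∀ x ∈ PySem.Set.ofList arr, -2147483648 ≤ x ∧ x ≤ 2147483648 := by
    intro x hx
    have hx' : x ∈ arr := (PySem.Set.mem_ofList arr x).mp hx
    have := (List.all_eq_true.mp hdom) x hx'
    simpa [pvDomInt] using this
  unfold man_alt
  rw [PySem.List.sorted_eq_foldl_insertBy]
  show (PySem.Set.ofList arr).foldl (fun acc x => PySem.List.insertBy _ x acc) []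
      = _
  exact foldl_insertBy_congr (PySem.Set.ofList arr) _ _
    (fun a haS b hbS => comparator_agree a b (hbnd a haS) (hbnd b hbS))
    (PySem.Set.ofList arr) [] (fun _ h => h) (fun _ h => nomatch h)

theorem man_spec_aux (arr : List Int) (hdom : Dom_man arr) : man arr = man_alt arr := by
  have hfold := man_fold_split arr PySem.Set.empty PySem.Set.empty
  rw [man_alt_eq_sorted_pvKey arr hdom]
  unfold man
  rw [hfold]
  have hupd : ∀ ys : List Int, PySem.Set.update PySem.Set.empty ys = PySem.Set.ofList ys :=
    fun ys => PySem.Set.update_nil_left ys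
  simp only [hupd]
  set p : Int → Bool := fun x => PySem.Int.mod x 2 == 0 with hp
  set E := PySem.List.sorted (PySem.Set.ofList (arr.filter p)) (fun x => x) false with hE
  -- the odd half descending is the reverse of the odd half ascending
  set Oa := PySem.List.sorted (PySem.Set.ofList (arr.filter (fun x => !(p x)))) (fun x => x) false
    with hOa
  have hOrev : PySem.List.sorted (PySem.Set.ofList (arr.filter (fun x => !(p x)))) (fun x => x) true
      = Oa.reverse := by
    apply PySem.List.sorted_rev_eq_of_perm_of_pairwise_gt
    · exact (List.reverse_perm _).trans (PySem.List.sorted_perm _ _ _)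
    · simpa [List.pairwise_reverse] using PySem.List.sorted_ofList_pairwise_lt (arr.filter (fun x => !(p x)))
  rw [hOrev]
  -- now show sorted-by-pvKey of the whole set is E ++ Oa.reverse
  apply Eq.symm
  apply PySem.List.sorted_eq_of_perm_of_pairwise_lt
  · -- permutation
    have hEp : E.Perm ((PySem.Set.ofList arr).filter p) :=
      (PySem.List.sorted_perm _ _ _).trans (ofList_filter_perm arr p)
    have hOp : Oa.reverse.Perm ((PySem.Set.ofList arr).filter (fun x => !(p x))) :=
      ((List.reverse_perm _).trans (PySem.List.sorted_perm _ _ _)).trans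
        (ofList_filter_perm arr (fun x => !(p x)))
    exact (hEp.append hOp).trans (List.filter_append_perm p _)
  · -- strict pvKey order on E ++ Oa.reverse
    have hEmem : ∀ x ∈ E, p x = true ∧ -2147483648 ≤ x ∧ x ≤ 2147483648 := by
      intro x hx
      have hx1 : x ∈ arr.filter p := by
        have := (PySem.List.mem_sorted _ _ _ x).mp hx
        exact (PySem.Set.mem_ofList _ x).mp this
      rcases List.mem_filter.mp hx1 with ⟨hxa, hxp⟩
      have := (List.all_eq_true.mp hdom) x hxa
      exact ⟨hxp, by simpa [pvDomInt] using this⟩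
    have hOmem : ∀ x ∈ Oa, p x = false ∧ -2147483648 ≤ x ∧ x ≤ 2147483648 := by
      intro x hx
      have hx1 : x ∈ arr.filter (fun x => !(p x)) := by
        have := (PySem.List.mem_sorted _ _ _ x).mp hx
        exact (PySem.Set.mem_ofList _ x).mp this
      rcases List.mem_filter.mp hx1 with ⟨hxa, hxp⟩
      have := (List.all_eq_true.mp hdom) x hxa
      exact ⟨by simpa using hxp, by simpa [pvDomInt] using this⟩
    have hKE : ∀ x, p x = true → pvKey x = x := by
      intro x hx; simp only [pvKey, hp] at hx ⊢; rw [if_pos hx]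
    have hKO : ∀ x, p x = false → pvKey x = 8589934592 - x := by
      intro x hx
      rcases PySem.Int.mod_two_eq x with h | h
      · rw [hp] at hx; simp only [h] at hx; simp at hx
      · unfold pvKey; rw [h, if_neg (by decide)]
    apply List.pairwise_append.mpr
    refine ⟨?_, ?_, ?_⟩
    · -- within E: strictly increasing values, pvKey = id there
      have hElt : E.Pairwise (· < ·) := PySem.List.sorted_ofList_pairwise_lt _
      exact List.Pairwise.imp_of_mem (fun {a b} ha hb hab => by
        rw [hKE a (hEmem a ha).1, hKE b (hEmem b hb).1]; exact hab) hElt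
    · -- within Oa.reverse: values strictly decreasing, so 2^33 - x strictly increasing
      have hOlt : Oa.Pairwise (· < ·) := PySem.List.sorted_ofList_pairwise_lt _
      have hOr : Oa.reverse.Pairwise (fun a b => b < a) := by
        simpa [List.pairwise_reverse] using hOlt
      exact List.Pairwise.imp_of_mem (fun {a b} ha hb hab => by
        rw [hKO a (hOmem a (List.mem_reverse.mp ha)).1, hKO b (hOmem b (List.mem_reverse.mp hb)).1]
        omega) hOr
    · -- across: every even key ≤ 2^31 < 2^33 - 2^31 ≤ every odd key
      intro a ha b hb
      rcases hEmem a ha with ⟨hap, ha1, ha2⟩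
      rcases hOmem b (List.mem_reverse.mp hb) with ⟨hbp, hb1, hb2⟩
      rw [hKE a hap, hKO b hbp]
      omega

-- ===== VERDICT (by name: the statement is the Claim_ definition above) =====
theorem man_spec : Claim_equal_man := by
  intro arr hdom
  exact man_spec_aux arr hdom
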